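-- pv_equiv track=rewrite | github.com/kuzmiigo/advent-of-code | 2021/23/prog.py | room_to_hall_options
-- ===== SOURCE A (Python) =====
-- move_scores = {
--     'A': 1,
--     'B': 10,
--     'C': 100,
--     'D': 1000
-- }
--
-- r2a = ''.join(sorted(move_scores.keys()))
--
-- num_rooms = len(r2a)
--
-- room_pos = [2 + 2 * i for i in range(num_rooms)]
--
-- def room_size(rooms):
--     return len(rooms) // num_rooms
--
-- def update(s, i, c):
--     """Update char in the given string at the given index."""
--     a = list(s)
--     a[i] = c
--     return ''.join(a)
--
-- def room_to_hall_options(ops, hall, rooms):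
--     rs = room_size(rooms)
--     for i in range(num_rooms):
--         for idx in range(rs):
--             a = rooms[rs * i + idx]
--             if a == '.':
--                 continue
--             # Amphipod in its target room
--             if a == r2a[i] and all([rooms[rs * i + j] == a
--                                     for j in range(idx + 1, rs)]):
--                 break
--             # Check hallway to the left
--             for j in range(room_pos[i] - 1, -1, -1):
--                 if hall[j] != '.':
--                     break
--                 if j in room_pos:
--                     continue
--                 rooms2 = update(rooms, rs * i + idx, '.')
--                 hall2 = update(hall, j, a)
--                 hall_path_len = abs(j - room_pos[i]) + 1 + idx
--                 ops.append((hall_path_len * move_scores[a], hall2, rooms2))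
--             # Check hallway to the right
--             for j in range(room_pos[i] + 1, len(hall)):
--                 if hall[j] != '.':
--                     break
--                 if j in room_pos:
--                     continue
--                 rooms2 = update(rooms, rs * i + idx, '.')
--                 hall2 = update(hall, j, a)
--                 hall_path_len = abs(j - room_pos[i]) + 1 + idx
--                 ops.append((hall_path_len * move_scores[a], hall2, rooms2))
--             # Process only one amphipod
--             break
--     return ops
-- ===== SOURCE B (Python) =====
-- # B: per room, locate the topmost occupant directly, then test each hallway
-- # candidate with an explicit path-clear predicate instead of scanning with break.
--
-- move_scores = {'A': 1, 'B': 10, 'C': 100, 'D': 1000}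
-- r2a = ''.join(sorted(move_scores.keys()))
-- num_rooms = len(r2a)
-- room_pos = [2 + 2 * i for i in range(num_rooms)]
--
--
-- def room_to_hall_options(ops, hall, rooms):
--     rs = len(rooms) // num_rooms
--     for i in range(num_rooms):
--         room = rooms[rs * i:rs * (i + 1)]
--         top = next((k for k, c in enumerate(room) if c != '.'), None)
--         if top is None:
--             continue
--         a = room[top]
--         if a == r2a[i] and all(c == a for c in room[top + 1:]):
--             continue
--         p = room_pos[i]
--         rooms2 = rooms[:rs * i + top] + '.' + rooms[rs * i + top + 1:]
--         left = range(p - 1, -1, -1)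
--         right = range(p + 1, len(hall))
--         for cand in (left, right):
--             for j in cand:
--                 lo, hi = (j, p - 1) if j < p else (p + 1, j)
--                 if any(hall[k] != '.' for k in range(lo, hi + 1)):
--                     continue
--                 if j in room_pos:
--                     continue
--                 hall2 = hall[:j] + a + hall[j + 1:]
--                 ops.append(((abs(j - p) + 1 + top) * move_scores[a], hall2, rooms2))
--     return ops
-- ===== Notes on version B (the rewrite author's own statement) =====
-- stated objective: alternative
-- what changed: B replaces A's skip-the-dots inner loop by a direct topmost-occupant lookup and replaces A's two outward break-on-first-obstacle hallway scans by a single candidate pass that keeps a destination only if every hall cell on the whole stretch between room entrance and destination is free (an explicit path-clear test per candidate). B trades A's early-break scans for per-candidate clarity tests, so it is not faster.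
import Mathlib
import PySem

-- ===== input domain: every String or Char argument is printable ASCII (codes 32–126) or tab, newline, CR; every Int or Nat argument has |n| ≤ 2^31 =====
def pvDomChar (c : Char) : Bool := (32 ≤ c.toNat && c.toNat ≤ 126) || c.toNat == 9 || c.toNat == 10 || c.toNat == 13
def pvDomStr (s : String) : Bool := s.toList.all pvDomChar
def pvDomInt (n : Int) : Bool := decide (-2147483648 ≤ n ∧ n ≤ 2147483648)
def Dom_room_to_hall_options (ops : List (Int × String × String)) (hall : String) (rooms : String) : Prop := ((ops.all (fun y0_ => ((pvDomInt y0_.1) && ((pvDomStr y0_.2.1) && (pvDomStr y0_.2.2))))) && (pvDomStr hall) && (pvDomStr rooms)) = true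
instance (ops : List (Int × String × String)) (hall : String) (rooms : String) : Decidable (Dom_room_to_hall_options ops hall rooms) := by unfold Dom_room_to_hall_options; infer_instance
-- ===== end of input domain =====

-- B replaces A's outward break-on-obstacle hallway scans and skip-dots inner loop by a direct
-- topmost-occupant lookup plus a per-candidate path-clear test (objective: alternative decomposition).
-- A mutates its argument `ops` in place (append); the equivalence proved here is about the RETURN value only.


-- shared module-level constants (move_scores, r2a, num_rooms = 4, room_pos)
def pvScore (a : Char) : Int :=
  if a = 'A' then 1 else if a = 'B' then 10 else if a = 'C' then 100 else if a = 'D' then 1000 else 0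

def pvR2A : List Char := ['A', 'B', 'C', 'D']

def pvRoomPos : List Nat := [2, 4, 6, 8]

-- ===== PORT A =====
-- the tuple appended inside A's hallway loops (update = set; in-range reads only under Pre_)
def pvAOpt (hall rooms : List Char) (rs i idx : Nat) (a : Char) (p j : Nat) : Int × String × String :=
  (((((j : Int) - (p : Int)).natAbs : Int) + 1 + (idx : Int)) * pvScore a,
   String.ofList (hall.set j a), String.ofList (rooms.set (rs * i + idx) '.'))

-- one of A's two hallway `for j` loops with its break/continue (list of j values supplied);
-- hall.getD j '#' : out-of-range reads (Python IndexError, outside Pre_) read as a blocker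
def pvAScan (hall rooms : List Char) (rs i idx : Nat) (a : Char) (p : Nat) :
    List Nat → List (Int × String × String) → List (Int × String × String)
  | [], ops => ops
  | j :: js, ops =>
    if hall.getD j '#' ≠ '.' then ops
    else if pvRoomPos.contains j then pvAScan hall rooms rs i idx a p js ops
    else pvAScan hall rooms rs i idx a p js (ops ++ [pvAOpt hall rooms rs i idx a p j])

-- A's inner `for idx in range(rs)` loop with its continue/breaks
def pvAIdxLoop (hall rooms : List Char) (rs i : Nat) :
    List Nat → List (Int × String × String) → List (Int × String × String)
  | [], ops => ops
  | idx :: rest, ops =>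
    let a := rooms.getD (rs * i + idx) '.'
    if a = '.' then pvAIdxLoop hall rooms rs i rest ops
    else if a = pvR2A.getD i ' ' ∧
        ((List.range' (idx + 1) (rs - (idx + 1))).all fun j => rooms.getD (rs * i + j) '.' = a) then
      ops
    else
      let p := 2 + 2 * i
      let ops1 := pvAScan hall rooms rs i idx a p ((List.range p).reverse) ops
      pvAScan hall rooms rs i idx a p (List.range' (p + 1) (hall.length - (p + 1))) ops1

def room_to_hall_options (ops : List (Int × String × String)) (hall : String) (rooms : String) :
    List (Int × String × String) :=
  let hallL := hall.toList
  let roomsL := rooms.toList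
  let rs := roomsL.length / 4
  List.foldl (fun acc i => pvAIdxLoop hallL roomsL rs i (List.range rs) acc) ops (List.range 4)

-- ===== PORT B =====
-- the tuple B appends (hall2/rooms2 built by slicing, not set)
def pvBOpt (hall : List Char) (a : Char) (top : Nat) (rooms2 : String) (p j : Nat) : Int × String × String :=
  (((((j : Int) - (p : Int)).natAbs : Int) + 1 + (top : Int)) * pvScore a,
   String.ofList (hall.take j ++ a :: hall.drop (j + 1)), rooms2)

-- B's per-candidate body: path-clear test on the whole stretch [lo, hi], then entrance skip
def pvBCand (hall : List Char) (a : Char) (top : Nat) (rooms2 : String) (p : Nat) (j : Nat) :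
    Option (Int × String × String) :=
  let lo := if j < p then j else p + 1
  let hi := if j < p then p - 1 else j
  if (List.range' lo (hi + 1 - lo)).any (fun k => hall.getD k '#' ≠ '.') then none
  else if pvRoomPos.contains j then none
  else some (pvBOpt hall a top rooms2 p j)

-- B's per-room step: locate the topmost occupant directly, then filter all candidates
def pvBRoom (hall rooms : List Char) (rs i : Nat) (ops : List (Int × String × String)) :
    List (Int × String × String) :=
  let room := (rooms.drop (rs * i)).take rs
  match room.findIdx? (fun c => c ≠ '.') with
  | none => ops
  | some top =>
    let a := room.getD top '.'
    if a = pvR2A.getD i ' ' ∧ (room.drop (top + 1)).all (fun c => c = a) then ops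
    else
      let p := 2 + 2 * i
      let rooms2 := String.ofList (rooms.take (rs * i + top) ++ '.' :: rooms.drop (rs * i + top + 1))
      let cands := (List.range p).reverse ++ List.range' (p + 1) (hall.length - (p + 1))
      ops ++ cands.filterMap (pvBCand hall a top rooms2 p)

def room_to_hall_options_alt (ops : List (Int × String × String)) (hall : String) (rooms : String) :
    List (Int × String × String) :=
  let hallL := hall.toList
  let roomsL := rooms.toList
  let rs := roomsL.length / 4
  List.foldl (fun acc i => pvBRoom hallL roomsL rs i acc) ops (List.range 4)

-- ===== PRECONDITION & SPEC =====
-- Pre_ excludes exactly the inputs on which Python A raises: an IndexError when a room holds a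
-- movable amphipod but the hallway string is shorter than that room's entrance position, and a
-- KeyError when a move of a character outside 'ABCD' actually gets appended (an adjacent free
-- hallway cell exists); everywhere else A returns normally.
def Pre_room_to_hall_options (ops : List (Int × String × String)) (hall : String) (rooms : String) : Prop :=
  ((List.range 4).all (fun i =>
     let hallL := hall.toList
     let roomsL := rooms.toList
     let rs := roomsL.length / 4
     let room := (roomsL.drop (rs * i)).take rs
     match room.findIdx? (fun c => c ≠ '.') with
     | none => true
     | some top =>
       let a := room.getD top '.'
       if a = (['A', 'B', 'C', 'D'].getD i ' ') ∧ (room.drop (top + 1)).all (fun c => c = a) then true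
       else
         let p := 2 + 2 * i
         decide (p ≤ hallL.length) &&
         (!(hallL.getD (p - 1) '#' == '.' ||
            (decide (p + 1 < hallL.length) && (hallL.getD (p + 1) '#' == '.'))) ||
          (['A', 'B', 'C', 'D'].contains a)))) = true
instance (ops : List (Int × String × String)) (hall : String) (rooms : String) : Decidable (Pre_room_to_hall_options ops hall rooms) := by unfold Pre_room_to_hall_options; infer_instance

def pvWitness_room_to_hall_options : (List (Int × String × String)) × String × String :=
  ([], "...........", "BACD")

def Spec_room_to_hall_options (ops : List (Int × String × String)) (hall : String) (rooms : String) (out : List (Int × String × String)) : Prop := out = room_to_hall_options_alt ops hall rooms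
instance (ops : List (Int × String × String)) (hall : String) (rooms : String) (out : List (Int × String × String)) : Decidable (Spec_room_to_hall_options ops hall rooms out) := by unfold Spec_room_to_hall_options; infer_instance

-- ===== CLAIM (what is proved, stated in full; the proofs are below) =====
def Claim_equal_room_to_hall_options : Prop := ∀ (ops : List (Int × String × String)) (hall : String) (rooms : String), Dom_room_to_hall_options ops hall rooms → Pre_room_to_hall_options ops hall rooms → Spec_room_to_hall_options ops hall rooms (room_to_hall_options ops hall rooms)

-- ===== LEMMAS AND PROOFS =====

-- the character A reads for room i, offset j (used to relate A's flat indexing to B's room slice)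
def pvGm (rooms : List Char) (rs i : Nat) (j : Nat) : Char := rooms.getD (rs * i + j) '.'

-- the body A executes for the first non-'.' offset (A's settled-check + two scans, verbatim)
def pvProc (hall rooms : List Char) (rs i idx : Nat) (ops : List (Int × String × String)) :
    List (Int × String × String) :=
  let a := rooms.getD (rs * i + idx) '.'
  if a = pvR2A.getD i ' ' ∧
      ((List.range' (idx + 1) (rs - (idx + 1))).all fun j => rooms.getD (rs * i + j) '.' = a) then
    ops
  else
    let p := 2 + 2 * i
    let ops1 := pvAScan hall rooms rs i idx a p ((List.range p).reverse) ops
    pvAScan hall rooms rs i idx a p (List.range' (p + 1) (hall.length - (p + 1))) ops1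

theorem pv_getD_oob (l : List Char) (i : Nat) (h : ¬ i < l.length) : l.getD i '#' = '#' := by
  simp [List.getD_eq_getElem?_getD, List.getElem?_eq_none (Nat.le_of_not_lt h)]

theorem pv_getD_in (l : List Char) (i : Nat) (h : l.getD i '#' = '.') : i < l.length := by
  by_contra hc
  rw [pv_getD_oob l i hc] at h
  exact absurd h (by decide)

-- A's skip-the-dots inner loop is B's findIdx? of the first occupant
theorem idxLoop_eq (hall rooms : List Char) (rs i : Nat) :
    ∀ (n s : Nat) (ops : List (Int × String × String)),
    pvAIdxLoop hall rooms rs i (List.range' s n) ops =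
      (match ((List.range' s n).map (pvGm rooms rs i)).findIdx? (fun c => c ≠ '.') with
       | none => ops
       | some t => pvProc hall rooms rs i (s + t) ops) := by
  intro n
  induction n with
  | zero => intro s ops; simp [pvAIdxLoop]
  | succ n ih =>
    intro s ops
    rw [List.range'_succ]
    simp only [List.map_cons, List.findIdx?_cons]
    by_cases h : rooms.getD (rs * i + s) '.' = '.'
    · have hgm : pvGm rooms rs i s = '.' := h
      have hd : decide (pvGm rooms rs i s ≠ '.') = false := by simp [hgm]
      rw [hd, if_neg (by simp)]
      have hA : pvAIdxLoop hall rooms rs i (s :: List.range' (s + 1) n) ops =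
          pvAIdxLoop hall rooms rs i (List.range' (s + 1) n) ops := by
        simp only [pvAIdxLoop]
        rw [if_pos h]
      rw [hA, ih]
      cases hf : ((List.range' (s + 1) n).map (pvGm rooms rs i)).findIdx? (fun c => c ≠ '.') with
      | none => simp
      | some t =>
        simp only [Option.map_some]
        have h1 : s + 1 + t = s + (t + 1) := by omega
        rw [h1]
    · have hgm : ¬ pvGm rooms rs i s = '.' := h
      have hd : decide (pvGm rooms rs i s ≠ '.') = true := by simp [hgm]
      rw [hd, if_pos rfl]
      simp only [pvAIdxLoop, pvProc]
      rw [if_neg h]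
      simp only [Nat.add_zero]

-- A's appended tuple is B's (update-by-set is splice, for in-range indices)
theorem opt_eq (hall rooms : List Char) (rs i idx : Nat) (a : Char) (p j : Nat)
    (hj : j < hall.length) (hr : rs * i + idx < rooms.length) :
    pvAOpt hall rooms rs i idx a p j =
      pvBOpt hall a idx
        (String.ofList (rooms.take (rs * i + idx) ++ '.' :: rooms.drop (rs * i + idx + 1))) p j := by
  unfold pvAOpt pvBOpt
  rw [List.set_eq_take_cons_drop a hj, List.set_eq_take_cons_drop '.' hr]

-- A's leftward break-scan collects exactly B's path-clear candidates (invariant: cells [m,p) clear)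
theorem scanL_eq (hall rooms : List Char) (rs i idx : Nat) (a : Char) (p : Nat)
    (hr : rs * i + idx < rooms.length) :
    ∀ (m : Nat) (ops : List (Int × String × String)), m ≤ p →
    (∀ k, m ≤ k → k < p → hall.getD k '#' = '.') →
    pvAScan hall rooms rs i idx a p ((List.range m).reverse) ops =
      ops ++ ((List.range m).reverse).filterMap
        (pvBCand hall a idx
          (String.ofList (rooms.take (rs * i + idx) ++ '.' :: rooms.drop (rs * i + idx + 1))) p) := by
  intro m
  induction m with
  | zero => intro ops _ _; simp [pvAScan]
  | succ m ih =>
    intro ops hm hclear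
    simp only [List.range_succ, List.reverse_append, List.reverse_singleton, List.singleton_append]
    by_cases hb : hall.getD m '#' ≠ '.'
    · simp only [pvAScan]
      rw [if_pos hb]
      have hnone : ∀ j ∈ m :: (List.range m).reverse,
          pvBCand hall a idx
            (String.ofList (rooms.take (rs * i + idx) ++ '.' :: rooms.drop (rs * i + idx + 1))) p j
            = none := by
        intro j hj
        have hjm : j ≤ m := by
          rcases List.mem_cons.mp hj with h' | h'
          · omega
          · have h2 := List.mem_range.mp (List.mem_reverse.mp h')
            omega
        have hjp : j < p := by omega
        simp only [pvBCand]
        rw [if_pos hjp, if_pos hjp]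
        have hany : (List.range' j (p - 1 + 1 - j)).any (fun k => hall.getD k '#' ≠ '.') = true := by
          rw [List.any_eq_true]
          refine ⟨m, ?_, by simpa using hb⟩
          rw [List.mem_range'_1]
          omega
        rw [if_pos (by simpa using hany)]
      rw [List.filterMap_eq_nil_iff.mpr hnone, List.append_nil]
    · have hb : hall.getD m '#' = '.' := not_not.mp hb
      have hm' : m < hall.length := pv_getD_in hall m hb
      have hclear' : ∀ k, m ≤ k → k < p → hall.getD k '#' = '.' := by
        intro k h1 h2
        rcases Nat.eq_or_lt_of_le h1 with h' | h'
        · rw [← h']; exact hb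
        · exact hclear k h' h2
      by_cases he : pvRoomPos.contains m
      · simp only [pvAScan]
        rw [if_neg (not_not_intro hb), if_pos he]
        rw [ih ops (by omega) hclear']
        have hcnone : pvBCand hall a idx
            (String.ofList (rooms.take (rs * i + idx) ++ '.' :: rooms.drop (rs * i + idx + 1))) p m
            = none := by
          simp only [pvBCand]
          rw [if_pos (by omega : m < p), if_pos (by omega : m < p)]
          by_cases hany : ((List.range' m (p - 1 + 1 - m)).any fun k => decide (hall.getD k '#' ≠ '.')) = true
          · rw [if_pos hany]
          · rw [if_neg hany, if_pos he]
        rw [List.filterMap_cons, hcnone]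
      · simp only [pvAScan]
        rw [if_neg (not_not_intro hb), if_neg he]
        rw [ih _ (by omega) hclear']
        have hanyf : (List.range' m (p - 1 + 1 - m)).any (fun k => hall.getD k '#' ≠ '.') = false := by
          rw [List.any_eq_false]
          intro k hk
          rw [List.mem_range'_1] at hk
          have hck := hclear' k hk.1 (by omega)
          rw [List.getD_eq_getElem?_getD] at hck
          simp [hck]
        have hsome : pvBCand hall a idx
            (String.ofList (rooms.take (rs * i + idx) ++ '.' :: rooms.drop (rs * i + idx + 1))) p m
            = some (pvBOpt hall a idx
              (String.ofList (rooms.take (rs * i + idx) ++ '.' :: rooms.drop (rs * i + idx + 1))) p m) := by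
          simp only [pvBCand]
          rw [if_pos (by omega : m < p), if_pos (by omega : m < p)]
          rw [if_neg (by rw [hanyf]; simp), if_neg he]
        rw [List.filterMap_cons, hsome]
        rw [opt_eq hall rooms rs i idx a p m hm' hr]
        simp [List.append_assoc]

-- A's rightward break-scan collects exactly B's path-clear candidates (invariant: cells (p,m) clear)
theorem scanR_eq (hall rooms : List Char) (rs i idx : Nat) (a : Char) (p : Nat)
    (hr : rs * i + idx < rooms.length) :
    ∀ (n m : Nat) (ops : List (Int × String × String)), p + 1 ≤ m →
    (∀ k, p + 1 ≤ k → k < m → hall.getD k '#' = '.') →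
    pvAScan hall rooms rs i idx a p (List.range' m n) ops =
      ops ++ (List.range' m n).filterMap
        (pvBCand hall a idx
          (String.ofList (rooms.take (rs * i + idx) ++ '.' :: rooms.drop (rs * i + idx + 1))) p) := by
  intro n
  induction n with
  | zero => intro m ops _ _; simp [pvAScan]
  | succ n ih =>
    intro m ops hm hclear
    rw [List.range'_succ]
    by_cases hb : hall.getD m '#' ≠ '.'
    · simp only [pvAScan]
      rw [if_pos hb]
      have hnone : ∀ j ∈ m :: List.range' (m + 1) n,
          pvBCand hall a idx
            (String.ofList (rooms.take (rs * i + idx) ++ '.' :: rooms.drop (rs * i + idx + 1))) p j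
            = none := by
        intro j hj
        have hjm : m ≤ j := by
          rcases List.mem_cons.mp hj with h' | h'
          · omega
          · have h2 := List.mem_range'_1.mp h'
            omega
        simp only [pvBCand]
        rw [if_neg (by omega : ¬ j < p), if_neg (by omega : ¬ j < p)]
        have hany : (List.range' (p + 1) (j + 1 - (p + 1))).any
            (fun k => hall.getD k '#' ≠ '.') = true := by
          rw [List.any_eq_true]
          refine ⟨m, ?_, by simpa using hb⟩
          rw [List.mem_range'_1]
          omega
        rw [if_pos (by simpa using hany)]
      rw [List.filterMap_eq_nil_iff.mpr hnone, List.append_nil]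
    · have hb : hall.getD m '#' = '.' := not_not.mp hb
      have hm' : m < hall.length := pv_getD_in hall m hb
      have hclear' : ∀ k, p + 1 ≤ k → k < m + 1 → hall.getD k '#' = '.' := by
        intro k h1 h2
        rcases Nat.lt_or_ge k m with h' | h'
        · exact hclear k h1 h'
        · have h3 : k = m := by omega
          rw [h3]; exact hb
      by_cases he : pvRoomPos.contains m
      · simp only [pvAScan]
        rw [if_neg (not_not_intro hb), if_pos he]
        rw [ih (m + 1) ops (by omega) hclear']
        have hcnone : pvBCand hall a idx
            (String.ofList (rooms.take (rs * i + idx) ++ '.' :: rooms.drop (rs * i + idx + 1))) p m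
            = none := by
          simp only [pvBCand]
          rw [if_neg (by omega : ¬ m < p), if_neg (by omega : ¬ m < p)]
          by_cases hany : ((List.range' (p + 1) (m + 1 - (p + 1))).any fun k => decide (hall.getD k '#' ≠ '.')) = true
          · rw [if_pos hany]
          · rw [if_neg hany, if_pos he]
        rw [List.filterMap_cons, hcnone]
      · simp only [pvAScan]
        rw [if_neg (not_not_intro hb), if_neg he]
        rw [ih (m + 1) _ (by omega) hclear']
        have hanyf : (List.range' (p + 1) (m + 1 - (p + 1))).any
            (fun k => hall.getD k '#' ≠ '.') = false := by
          rw [List.any_eq_false]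
          intro k hk
          rw [List.mem_range'_1] at hk
          have hck := hclear' k hk.1 (by omega)
          rw [List.getD_eq_getElem?_getD] at hck
          simp [hck]
        have hsome : pvBCand hall a idx
            (String.ofList (rooms.take (rs * i + idx) ++ '.' :: rooms.drop (rs * i + idx + 1))) p m
            = some (pvBOpt hall a idx
              (String.ofList (rooms.take (rs * i + idx) ++ '.' :: rooms.drop (rs * i + idx + 1))) p m) := by
          simp only [pvBCand]
          rw [if_neg (by omega : ¬ m < p), if_neg (by omega : ¬ m < p)]
          rw [if_neg (by rw [hanyf]; simp), if_neg he]
        rw [List.filterMap_cons, hsome]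
        rw [opt_eq hall rooms rs i idx a p m hm' hr]
        simp [List.append_assoc]

-- the room slice B takes is A's flat reads
theorem room_map (rooms : List Char) (rs i : Nat) (h : rs * (i + 1) ≤ rooms.length) :
    (rooms.drop (rs * i)).take rs = (List.range' 0 rs).map (pvGm rooms rs i) := by
  have hh : rs * i + rs ≤ rooms.length := by
    rw [← Nat.mul_succ]
    exact h
  apply List.ext_getElem
  · simp
    omega
  · intro k h1 h2
    simp only [List.getElem_take, List.getElem_drop, List.getElem_map, List.getElem_range']
    unfold pvGm
    have hk : k < rs := by simpa using h2
    rw [List.getD_eq_getElem _ '.' (by omega)]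
    congr 1
    omega

theorem room_eq (hall rooms : List Char) (rs i : Nat) (hrs : rs = rooms.length / 4) (hi : i < 4)
    (ops : List (Int × String × String)) :
    pvAIdxLoop hall rooms rs i (List.range rs) ops = pvBRoom hall rooms rs i ops := by
  have h4 : rs * 4 ≤ rooms.length := by omega
  have h41 : rs * (i + 1) ≤ rooms.length := by
    calc rs * (i + 1) ≤ rs * 4 := Nat.mul_le_mul_left rs (by omega)
    _ ≤ rooms.length := h4
  rw [List.range_eq_range', idxLoop_eq]
  simp only [pvBRoom]
  rw [room_map rooms rs i h41]
  cases hf : ((List.range' 0 rs).map (pvGm rooms rs i)).findIdx? (fun c => c ≠ '.') with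
  | none => rfl
  | some top =>
    have htop : top < rs := by
      have h5 := List.findIdx?_eq_some_iff_findIdx_eq.mp hf
      simpa using h5.1
    have hr : rs * i + top < rooms.length := by
      have : rs * i + top < rs * (i + 1) := by rw [Nat.mul_succ]; omega
      omega
    have ha : ((List.range' 0 rs).map (pvGm rooms rs i)).getD top '.' = pvGm rooms rs i top := by
      rw [List.getD_eq_getElem _ '.' (by simpa using htop)]
      simp [List.getElem_range']
    simp only [Nat.zero_add]
    simp only [pvProc]
    have hg : pvGm rooms rs i top = rooms.getD (rs * i + top) '.' := rfl
    rw [ha, hg]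
    have hdropall : (((List.range' 0 rs).map (pvGm rooms rs i)).drop (top + 1)).all
        (fun c => decide (c = rooms.getD (rs * i + top) '.')) =
        ((List.range' (top + 1) (rs - (top + 1))).all
          fun j => decide (rooms.getD (rs * i + j) '.' = rooms.getD (rs * i + top) '.')) := by
      rw [← List.map_drop, List.all_map]
      have hdr : (List.range' 0 rs).drop (top + 1) = List.range' (top + 1) (rs - (top + 1)) := by
        rw [List.drop_range']
        congr 1
        omega
      rw [hdr]
      rfl
    rw [hdropall]
    split
    · rfl
    · rw [scanL_eq hall rooms rs i top _ _ hr (2 + 2 * i) ops (by omega)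
          (by intro k h1 h2; omega)]
      rw [scanR_eq hall rooms rs i top _ _ hr (hall.length - (2 + 2 * i + 1)) (2 + 2 * i + 1)
          _ (by omega) (by intro k h1 h2; omega)]
      rw [List.filterMap_append, ← List.append_assoc]

-- ===== VERDICT (by name: the statement is the Claim_ definition above) =====
theorem room_to_hall_options_spec : Claim_equal_room_to_hall_options := by
  intro ops hall rooms _ _
  unfold Spec_room_to_hall_options room_to_hall_options room_to_hall_options_alt
  simp only [List.range_succ, List.range_zero, List.foldl_append, List.foldl_cons, List.foldl_nil,
    List.nil_append]
  rw [room_eq _ _ _ 0 rfl (by norm_num), room_eq _ _ _ 1 rfl (by norm_num),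
    room_eq _ _ _ 2 rfl (by norm_num), room_eq _ _ _ 3 rfl (by norm_num)]
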